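-- pv_equiv track=rewrite | github.com/ElliottSobek/Roman-Numeral-Generator | main.py | is_subtraction
-- ===== SOURCE A (Python) =====
-- numeral_lookup = [(1, 'I'), (5, 'V'), (10, 'X'), (50, 'L'), (100, 'C'), (500, 'D'), (1000, 'M'), (5000, 'U+2181'),
--                       (10000, 'U+2182'), (50000, 'U+2187'), (100000, 'U+2188')]
--
-- def is_subtraction(num):
--     result = []
--     prev = (0, 0)
--
--     if num == 1:
--         return False
--
--     for item in numeral_lookup:
--         if (num == (item[0] - prev[0])) and (num != (item[0] // 2)):
--             result.append(item[1])
--             result.insert(0, prev[1])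
--             num -= (item[0] - prev[0])
--             return True
--         prev = item
--     # return result
--     return False
-- ===== SOURCE B (Python) =====
-- def is_subtraction(num):
--     # Closed form: A returns True exactly on the non-half adjacent differences
--     # of its lookup table, i.e. 4, 40, 400, 4000, 40000.
--     return num in (4, 40, 400, 4000, 40000)
-- ===== Notes on version B (the rewrite author's own statement) =====
-- stated objective: simpler
-- what changed: Replaced the scan over the numeral lookup table (adjacent differences with a half-value filter and dead result-list building) by a direct membership test against the five values the scan can ever accept.
import Mathlib
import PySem

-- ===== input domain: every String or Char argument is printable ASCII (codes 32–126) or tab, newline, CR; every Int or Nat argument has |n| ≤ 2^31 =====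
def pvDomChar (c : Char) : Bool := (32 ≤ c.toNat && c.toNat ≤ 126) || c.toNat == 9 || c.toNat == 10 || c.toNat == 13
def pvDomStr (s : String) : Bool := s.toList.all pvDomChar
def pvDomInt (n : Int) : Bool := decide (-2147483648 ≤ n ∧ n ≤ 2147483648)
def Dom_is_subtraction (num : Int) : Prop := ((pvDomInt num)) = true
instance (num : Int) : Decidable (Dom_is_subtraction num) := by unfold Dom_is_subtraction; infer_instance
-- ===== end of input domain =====

-- B replaces A's scan over the lookup table by a direct membership test against
-- the five values the scan can accept; objective: simpler.


-- ===== PORT A =====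
def numeral_lookup : List (Int × String) :=
  [(1, "I"), (5, "V"), (10, "X"), (50, "L"), (100, "C"), (500, "D"), (1000, "M"),
   (5000, "U+2181"), (10000, "U+2182"), (50000, "U+2187"), (100000, "U+2188")]

-- the for-loop with its early return; `result` is built in A but never returned
-- (A returns only True/False), so only `prev`'s first component affects the result;
-- we carry prev's value and keep the condition step for step.
def is_subtraction_loop (num : Int) (prev : Int) : List (Int × String) → Bool
  | [] => false
  | item :: rest =>
    if num == item.1 - prev && num != PySem.Int.floordiv item.1 2 then true
    else is_subtraction_loop num item.1 rest

def is_subtraction (num : Int) : Bool :=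
  if num == 1 then false
  else is_subtraction_loop num 0 numeral_lookup

-- ===== PORT B =====
def is_subtraction_alt (num : Int) : Bool :=
  [(4 : Int), 40, 400, 4000, 40000].contains num

-- ===== PRECONDITION & SPEC =====
def Spec_is_subtraction (num : Int) (out : Bool) : Prop := out = is_subtraction_alt num
instance (num : Int) (out : Bool) : Decidable (Spec_is_subtraction num out) := by unfold Spec_is_subtraction; infer_instance

-- ===== CLAIM (what is proved, stated in full; the proofs are below) =====
def Claim_equal_is_subtraction : Prop := ∀ (num : Int), Dom_is_subtraction num → Spec_is_subtraction num (is_subtraction num)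

-- ===== LEMMAS AND PROOFS =====

-- ===== VERDICT (by name: the statement is the Claim_ definition above) =====
theorem is_subtraction_spec : Claim_equal_is_subtraction := by
  intro num _
  unfold Spec_is_subtraction is_subtraction is_subtraction_alt numeral_lookup
  simp only [is_subtraction_loop, PySem.Int.floordiv]
  by_cases h1 : num = 1 <;> simp_all
  rw [Bool.eq_iff_iff]; simp; omega
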